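-- pv_equiv track=rewrite | github.com/addhome2001/python-algorithms-practice | data-structure/stack.py | decimal2Hex
-- ===== SOURCE A (Python) =====
-- class Stack:
--     def __init__(self):
--         self.items = []
--
--     def isEmpty(self):
--         return len(self.items) <= 0
--
--     def push(self, item):
--         self.items.append(item)
--
--     def pop(self):
--         return self.items.pop()
--
--     def size(self):
--         return len(self.items)
--
-- def decimal2Hex(intNum):
--     remainder_num = intNum
--     hex_stack = Stack()
--     hex_result = ''
--     hex_reference = '0123456789ABCDEF';
--
--     while (remainder_num > 0):
--         remainder = remainder_num % 16;
--         hex_stack.push(hex_reference[remainder])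
--         remainder_num = remainder_num // 16
--
--     while (not hex_stack.isEmpty()):
--         hex_result += str(hex_stack.pop())
--
--     return hex_result
-- ===== SOURCE B (Python) =====
-- def decimal2Hex(intNum):
--     if intNum <= 0:
--         return ''
--     return decimal2Hex(intNum // 16) + '0123456789ABCDEF'[intNum % 16]
-- ===== Notes on version B (the rewrite author's own statement) =====
-- stated objective: simpler
-- what changed: Replaced the Stack class plus two while-loops (push digits, then pop to build the string) with a three-line recursion that emits most-significant digits first directly.
import Mathlib
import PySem

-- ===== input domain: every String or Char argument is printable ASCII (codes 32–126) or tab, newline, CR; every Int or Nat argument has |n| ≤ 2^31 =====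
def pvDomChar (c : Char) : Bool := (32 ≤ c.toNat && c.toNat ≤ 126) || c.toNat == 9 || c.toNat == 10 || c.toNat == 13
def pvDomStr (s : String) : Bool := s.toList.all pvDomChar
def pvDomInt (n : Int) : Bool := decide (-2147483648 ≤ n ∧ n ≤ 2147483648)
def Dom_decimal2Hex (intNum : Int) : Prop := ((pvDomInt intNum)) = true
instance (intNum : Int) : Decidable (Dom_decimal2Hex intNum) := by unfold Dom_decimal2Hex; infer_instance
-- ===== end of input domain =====

-- B replaces A's Stack class and two while-loops by a direct three-line recursion; objective: simpler.

-- ===== PORT A =====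
-- hex_reference = '0123456789ABCDEF'
def pvHexRef : List Char := "0123456789ABCDEF".toList

-- first while-loop: push hex_reference[remainder_num % 16] and floor-divide by 16 while remainder_num > 0;
-- the Stack's items list is `stack` (push = append at the end, as Python list.append);
-- the indexing hex_reference[remainder] is always in range (0 ≤ remainder < 16), so the .getD default is never used
def pvPushLoop (r : Int) (stack : List Char) : List Char :=
  if h : r > 0 then
    pvPushLoop (PySem.Int.floordiv r 16)
      (stack ++ [(PySem.List.pyGet? pvHexRef (PySem.Int.mod r 16)).getD ' '])
  else stack
termination_by r.toNat
decreasing_by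
  have h1 : PySem.Int.floordiv r 16 < r := (PySem.Int.floordiv_lt_iff_lt_mul (by norm_num)).mpr (by omega)
  have h2 : PySem.Int.floordiv r 16 = r / 16 := PySem.Int.floordiv_eq_ediv_of_pos (by norm_num)
  have h3 : (0:Int) ≤ r / 16 := Int.ediv_nonneg (le_of_lt h) (by norm_num)
  omega

-- second while-loop: pop (remove the LAST item, as Python list.pop) and append it to hex_result until empty
def pvPopLoop (stack : List Char) (res : String) : String :=
  if h : stack.isEmpty then res
  else pvPopLoop stack.dropLast (res ++ String.ofList [stack.getLast!])
termination_by stack.length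
decreasing_by
  have : stack ≠ [] := by simpa [List.isEmpty_iff] using h
  have : stack.length ≠ 0 := by simpa using List.length_eq_zero_iff.not.mpr this
  simp [List.length_dropLast]; omega

def decimal2Hex (intNum : Int) : String :=
  pvPopLoop (pvPushLoop intNum []) ""

-- ===== PORT B =====
def decimal2Hex_alt (intNum : Int) : String :=
  if h : intNum ≤ 0 then ""
  else decimal2Hex_alt (PySem.Int.floordiv intNum 16)
        ++ String.ofList [(PySem.List.pyGet? pvHexRef (PySem.Int.mod intNum 16)).getD ' ']
termination_by intNum.toNat
decreasing_by
  have h1 : PySem.Int.floordiv intNum 16 < intNum := (PySem.Int.floordiv_lt_iff_lt_mul (by norm_num)).mpr (by omega)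
  have h3 : (0:Int) ≤ PySem.Int.floordiv intNum 16 := by
    rw [PySem.Int.floordiv_eq_ediv_of_pos (by norm_num)]
    exact Int.ediv_nonneg (by omega) (by norm_num)
  omega

-- ===== PRECONDITION & SPEC =====
def Spec_decimal2Hex (intNum : Int) (out : String) : Prop := out = decimal2Hex_alt intNum
instance (intNum : Int) (out : String) : Decidable (Spec_decimal2Hex intNum out) := by unfold Spec_decimal2Hex; infer_instance

-- ===== CLAIM (what is proved, stated in full; the proofs are below) =====
def Claim_equal_decimal2Hex : Prop := ∀ (intNum : Int), Dom_decimal2Hex intNum → Spec_decimal2Hex intNum (decimal2Hex intNum)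

-- ===== LEMMAS AND PROOFS =====

theorem pvPopLoop_eq (stack : List Char) (res : String) :
    pvPopLoop stack res = res ++ String.ofList stack.reverse := by
  induction stack, res using pvPopLoop.induct with
  | case1 stack res h =>
    have : stack = [] := by simpa [List.isEmpty_iff] using h
    subst this
    simp [pvPopLoop]
  | case2 stack res h ih =>
    have hne : stack ≠ [] := by simpa [List.isEmpty_iff] using h
    obtain ⟨a, as, rfl⟩ := List.exists_cons_of_ne_nil hne
    rw [pvPopLoop]
    simp only [h, Bool.false_eq_true, dite_false]
    rw [ih]
    have hrev : (a :: as).reverse = (a :: as).getLast hne :: (a :: as).dropLast.reverse := by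
      conv_lhs => rw [← List.dropLast_append_getLast hne]
      simp
    rw [hrev]
    rw [String.append_assoc, ← String.ofList_append]
    simp [List.getLast!]

theorem pvPushLoop_eq (r : Int) (s : List Char) :
    String.ofList (pvPushLoop r s).reverse = decimal2Hex_alt r ++ String.ofList s.reverse := by
  induction r, s using pvPushLoop.induct with
  | case1 r s h ih =>
    rw [pvPushLoop]
    simp only [h, dite_true]
    rw [ih]
    conv_rhs => rw [decimal2Hex_alt, dif_neg (show ¬ r ≤ 0 by omega)]
    rw [String.append_assoc]
    congr 1
    rw [List.reverse_append, List.reverse_singleton, ← String.ofList_append]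
  | case2 r s h =>
    rw [pvPushLoop, decimal2Hex_alt]
    simp [h, show r ≤ 0 by omega]

-- ===== VERDICT (by name: the statement is the Claim_ definition above) =====
theorem decimal2Hex_spec : Claim_equal_decimal2Hex := by
  intro n _
  unfold Spec_decimal2Hex decimal2Hex
  rw [pvPopLoop_eq, pvPushLoop_eq]
  simp
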